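-- pv_equiv track=rewrite | github.com/seziop/Duke-CS101 | Assignment 5 - Clever Hangman/CleverHangman.py | createDisplayString
-- ===== SOURCE A (Python) =====
-- def createDisplayString(lettersGuessed, misses, hangmanWord):
--     '''
--     Creates the string that will be displayed to the user, using the information in the parameters.
--     '''
--     answer = ''
--     alphabet = 'abcdefghijklmnopqrstuvwxyz'
--     for char in lettersGuessed:
--         alphabet = alphabet.replace(char,' ')
--     for letter in hangmanWord:
--         answer = answer + letter + ' '
--     return "letters not yet guessed:" + ' ' + alphabet + '\n'+ "misses remaining =" + ' ' + str(misses) + '\n' + answer.strip()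
--     pass
-- ===== SOURCE B (Python) =====
-- def createDisplayString(lettersGuessed, misses, hangmanWord):
--     '''
--     Creates the string that will be displayed to the user, using the information in the parameters.
--     '''
--     guessed = set(lettersGuessed)
--     remaining = ''.join(' ' if c in guessed else c for c in 'abcdefghijklmnopqrstuvwxyz')
--     spaced = ' '.join(hangmanWord).strip()
--     return "letters not yet guessed: " + remaining + "\nmisses remaining = " + str(misses) + "\n" + spaced
-- ===== Notes on version B (the rewrite author's own statement) =====
-- stated objective: idiomatic
-- what changed: Instead of rescanning the whole 26-letter alphabet with str.replace once per guess, B builds a set of guessed letters and masks the alphabet in one membership-filtered pass, and renders the word with ' '.join(...).strip() instead of accumulating 'answer + letter + space' strings in a loop.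
import Mathlib
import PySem

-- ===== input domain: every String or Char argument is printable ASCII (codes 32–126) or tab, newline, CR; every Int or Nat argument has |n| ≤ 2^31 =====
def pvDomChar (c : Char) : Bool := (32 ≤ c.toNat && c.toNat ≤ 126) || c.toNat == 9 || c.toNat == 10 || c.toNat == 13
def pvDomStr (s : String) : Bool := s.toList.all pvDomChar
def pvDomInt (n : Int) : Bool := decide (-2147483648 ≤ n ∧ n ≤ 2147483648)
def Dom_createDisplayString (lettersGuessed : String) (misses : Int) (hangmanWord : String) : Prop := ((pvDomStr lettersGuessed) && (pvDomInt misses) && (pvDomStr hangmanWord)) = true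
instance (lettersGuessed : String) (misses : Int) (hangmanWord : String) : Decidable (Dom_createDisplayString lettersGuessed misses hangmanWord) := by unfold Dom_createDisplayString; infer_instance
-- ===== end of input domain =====

-- B masks the alphabet in one membership pass over a set of guessed letters and renders the word
-- with ' '.join(...).strip() instead of per-guess str.replace rescans and a letter+space accumulator loop (idiomatic).


-- ===== PORT A =====
def createDisplayString (lettersGuessed : String) (misses : Int) (hangmanWord : String) : String :=
  let alphabet :=
    lettersGuessed.toList.foldl
      (fun alphabet ch => PySem.Str.replace alphabet (String.ofList [ch]) " ")
      "abcdefghijklmnopqrstuvwxyz"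
  let answer :=
    hangmanWord.toList.foldl (fun answer letter => answer ++ String.ofList [letter] ++ " ") ""
  "letters not yet guessed:" ++ " " ++ alphabet ++ "\n" ++ "misses remaining =" ++ " " ++
    PySem.Int.toStr misses ++ "\n" ++ PySem.Str.strip answer

-- ===== PORT B =====
def createDisplayString_alt (lettersGuessed : String) (misses : Int) (hangmanWord : String) : String :=
  let guessed : PySem.Set Char := PySem.Set.ofList lettersGuessed.toList
  let remaining := String.ofList
    (("abcdefghijklmnopqrstuvwxyz").toList.map (fun c => if PySem.Set.contains guessed c then ' ' else c))
  let spaced := PySem.Str.strip (PySem.Str.join " " (hangmanWord.toList.map (fun c => String.ofList [c])))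
  "letters not yet guessed: " ++ remaining ++ "\nmisses remaining = " ++
    PySem.Int.toStr misses ++ "\n" ++ spaced

-- ===== PRECONDITION & SPEC =====
def Spec_createDisplayString (lettersGuessed : String) (misses : Int) (hangmanWord : String) (out : String) : Prop := out = createDisplayString_alt lettersGuessed misses hangmanWord
instance (lettersGuessed : String) (misses : Int) (hangmanWord : String) (out : String) : Decidable (Spec_createDisplayString lettersGuessed misses hangmanWord out) := by unfold Spec_createDisplayString; infer_instance

-- ===== CLAIM (what is proved, stated in full; the proofs are below) =====
def Claim_equal_createDisplayString : Prop := ∀ (lettersGuessed : String) (misses : Int) (hangmanWord : String), Dom_createDisplayString lettersGuessed misses hangmanWord → Spec_createDisplayString lettersGuessed misses hangmanWord (createDisplayString lettersGuessed misses hangmanWord)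

-- ===== LEMMAS AND PROOFS =====

-- Python `s.replace(c, d)` for single characters is a character map.
theorem pvReplaceGoSingle (c d : Char) : ∀ (fuel : Nat) (l acc : List Char), l.length ≤ fuel →
    PySem.Chars.replace.go [c] [d] fuel l acc
      = acc.reverse ++ l.map (fun x => if x = c then d else x)
  | fuel, [], acc, _ => by cases fuel <;> simp [PySem.Chars.replace.go]
  | 0, x :: t, acc, h => by simp at h
  | fuel+1, x :: t, acc, h => by
      simp only [PySem.Chars.replace.go]
      by_cases hx : c = x
      · subst hx
        rw [if_pos (by simp [List.isPrefixOf])]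
        have hrec := pvReplaceGoSingle c d fuel t (d :: acc) (by simpa using h)
        simpa using hrec
      · rw [if_neg (by simp [List.isPrefixOf, hx])]
        rw [pvReplaceGoSingle c d fuel t (x :: acc) (by simpa using h)]
        simp [Ne.symm hx]

theorem pvReplaceSingle (c d : Char) (l : List Char) :
    PySem.Chars.replace l [c] [d] = l.map (fun x => if x = c then d else x) := by
  simpa [PySem.Chars.replace] using pvReplaceGoSingle c d l.length l [] le_rfl

-- The replace loop over the guesses masks exactly the guessed characters.
theorem pvMaskFoldl (gs : List Char) : ∀ (al : List Char),
    gs.foldl (fun a ch => PySem.Chars.replace a [ch] [' ']) al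
      = al.map (fun x => if x ∈ gs then ' ' else x) := by
  induction gs with
  | nil => intro al; simp
  | cons g gs ih =>
      intro al
      rw [List.foldl_cons, pvReplaceSingle, ih, List.map_map]
      refine List.map_congr_left (fun x _ => ?_)
      by_cases hg : x = g <;> by_cases hm : x ∈ gs <;>
        simp [Function.comp, hg, hm]

theorem pvMaskFun (gs : List Char) (x : Char) :
    (if (PySem.Set.ofList gs).contains x then ' ' else x) = (if x ∈ gs then ' ' else x) := by
  by_cases h : x ∈ gs <;>
    simp [PySem.Set.contains, PySem.Set.mem_ofList, h]

-- the A-side String folds, moved to List Char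
theorem pvToListFoldlReplace (gs : List Char) (s : String) :
    (gs.foldl (fun a ch => PySem.Str.replace a (String.ofList [ch]) " ") s).toList
      = gs.foldl (fun a ch => PySem.Chars.replace a [ch] [' ']) s.toList := by
  induction gs generalizing s with
  | nil => rfl
  | cons g gs ih =>
      simp only [List.foldl_cons, ih]
      congr 1
      simp [PySem.Str.toList_replace]

theorem pvToListFoldlSpace (l : List Char) (s : String) :
    (l.foldl (fun a c => a ++ String.ofList [c] ++ " ") s).toList
      = l.foldl (fun a c => a ++ [c, ' ']) s.toList := by
  induction l generalizing s with
  | nil => rfl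
  | cons c l ih =>
      simp only [List.foldl_cons, ih]
      congr 1
      simp

theorem pvFoldlSpaceEq (l : List Char) (a : List Char) :
    l.foldl (fun a c => a ++ [c, ' ']) a = a ++ l.flatMap (fun c => [c, ' ']) := by
  induction l generalizing a with
  | nil => simp
  | cons c l ih => simp [List.foldl_cons, ih]

-- ' '.join over the word's characters, in closed form
theorem pvJoinCons (c : Char) (l : List Char) :
    PySem.Chars.join [' '] ((c :: l).map (fun x => [x]))
      = c :: l.flatMap (fun d => [' ', d]) := by
  induction l generalizing c with
  | nil => simp [PySem.Chars.join_singleton]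
  | cons d t ih =>
      rw [List.map_cons, List.map_cons, PySem.Chars.join_cons_cons,
        show ([d] :: List.map (fun x => [x]) t) = List.map (fun x => [x]) (d :: t) from rfl,
        ih d]
      simp

theorem pvFlatMapSpace (c : Char) (l : List Char) :
    (c :: l).flatMap (fun x => [x, ' ']) = (c :: l.flatMap (fun d => [' ', d])) ++ [' '] := by
  induction l generalizing c with
  | nil => rfl
  | cons d t ih =>
      rw [List.flatMap_cons, ih d]
      simp

-- stripping ignores a trailing space
theorem pvStripSnocSpace (l : List Char) :
    PySem.Chars.strip (l ++ [' ']) = PySem.Chars.strip l := by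
  unfold PySem.Chars.strip PySem.Chars.lstrip PySem.Chars.rstrip
  rw [List.dropWhile_append]
  split_ifs with h
  · rw [List.isEmpty_iff] at h
    rw [h]
    simp [(by decide : PySem.Chars.isspace ' ' = true)]
  · rw [List.reverse_append]
    simp [(by decide : PySem.Chars.isspace ' ' = true)]

-- ===== VERDICT (by name: the statement is the Claim_ definition above) =====
theorem createDisplayString_spec : Claim_equal_createDisplayString := by
  intro lg m w _
  apply String.toList_inj.mp
  simp only [createDisplayString, createDisplayString_alt, String.toList_append,
    PySem.Str.toList_strip, PySem.Str.toList_join, String.toList_ofList]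
  rw [pvToListFoldlReplace, pvToListFoldlSpace, pvMaskFoldl, pvFoldlSpaceEq]
  have hmask : ("abcdefghijklmnopqrstuvwxyz" : String).toList.map
        (fun x => if (PySem.Set.ofList lg.toList).contains x then ' ' else x)
      = ("abcdefghijklmnopqrstuvwxyz" : String).toList.map
        (fun x => if x ∈ lg.toList then ' ' else x) :=
    List.map_congr_left (fun x _ => pvMaskFun lg.toList x)
  rw [hmask]
  have hword : PySem.Chars.strip (("" : String).toList ++ w.toList.flatMap (fun c => [c, ' ']))
      = PySem.Chars.strip (PySem.Chars.join (" " : String).toList (w.toList.map (fun c => [c]))) := by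
    cases hw : w.toList with
    | nil => simp [PySem.Chars.join_nil]
    | cons c l =>
        show PySem.Chars.strip (("" : String).toList ++ (c :: l).flatMap (fun x => [x, ' ']))
          = PySem.Chars.strip (PySem.Chars.join [' '] ((c :: l).map (fun x => [x])))
        rw [pvJoinCons, pvFlatMapSpace, show ("" : String).toList = [] from rfl, List.nil_append,
          pvStripSnocSpace]
  rw [List.map_map,
    show (String.toList ∘ fun c : Char => String.ofList [c]) = (fun c : Char => [c]) from
      funext (fun c => by simp),
    hword]
  simp
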